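-- pv_equiv track=rewrite | github.com/Millcool/deepfake-dataset-generation | detection/dashboard/evaluation_runner.py | _extract_dataset
-- ===== SOURCE A (Python) =====
-- _KNOWN_DETECTORS = ["clip_dfdet", "altfreezing", "genconvit", "cvit", "sbi", "npr", "clip"]
--
-- def _extract_dataset(run_id):
--     """Extract dataset key from run_id like '20250515_123456_LivePortrait_FFpp_genconvit'."""
--     # Remove date prefix (YYYYMMDD_HHMMSS_)
--     parts = run_id.split("_", 2)
--     if len(parts) < 3:
--         return None
--     remainder = parts[2]
--
--     # Try to strip known detector suffixes
--     for det in sorted(_KNOWN_DETECTORS, key=len, reverse=True):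
--         if remainder.endswith("_" + det):
--             return remainder[: -(len(det) + 1)]
--     return None
-- ===== SOURCE B (Python) =====
-- _KNOWN_DETECTORS = ["clip_dfdet", "altfreezing", "genconvit", "cvit", "sbi", "npr", "clip"]
--
--
-- def _extract_dataset(run_id):
--     """Extract dataset key from run_id like '20250515_123456_LivePortrait_FFpp_genconvit'."""
--     parts = run_id.split("_", 2)
--     if len(parts) < 3:
--         return None
--     remainder = parts[2]
--     detectors = set(_KNOWN_DETECTORS)
--     # Scan underscore positions left to right: the first position whose suffix is a
--     # known detector is the longest detector suffix, so the prefix before it is the dataset.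
--     for j, ch in enumerate(remainder):
--         if ch == "_" and remainder[j + 1:] in detectors:
--             return remainder[:j]
--     return None
-- ===== Notes on version B (the rewrite author's own statement) =====
-- stated objective: alternative
-- what changed: Instead of looping over the detector names sorted by length descending and testing whether the remainder ends with each one preceded by an underscore, B scans the remainder's underscore positions left to right and returns the prefix before the first position whose suffix is in a set of known detectors (the first such position gives the longest detector suffix, which is what A's length-descending order selects).
import Mathlib
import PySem

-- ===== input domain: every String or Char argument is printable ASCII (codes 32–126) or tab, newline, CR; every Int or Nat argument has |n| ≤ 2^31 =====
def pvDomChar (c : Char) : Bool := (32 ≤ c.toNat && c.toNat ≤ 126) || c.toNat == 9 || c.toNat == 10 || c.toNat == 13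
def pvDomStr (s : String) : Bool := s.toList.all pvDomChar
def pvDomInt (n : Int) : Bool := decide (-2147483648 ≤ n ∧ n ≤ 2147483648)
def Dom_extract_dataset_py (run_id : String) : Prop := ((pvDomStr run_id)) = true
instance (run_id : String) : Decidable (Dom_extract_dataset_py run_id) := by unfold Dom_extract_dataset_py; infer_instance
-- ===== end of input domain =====

-- B replaces A's loop-over-detectors-sorted-by-length (each doing an endswith scan) with a single
-- left-to-right scan over underscore positions of the remainder, testing the suffix after each
-- underscore for membership in a set of the known detectors; objective: alternative decomposition.

-- ===== PORT A =====
def pvKnownDetectors : List (List Char) :=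
  ["clip_dfdet".toList, "altfreezing".toList, "genconvit".toList, "cvit".toList,
   "sbi".toList, "npr".toList, "clip".toList]

-- A's 'for det in sorted(...): if remainder.endswith("_" + det): return remainder[:-(len(det)+1)]'
def pvStripLoop (remainder : List Char) : List (List Char) → Option (List Char)
  | [] => none
  | det :: rest =>
    if PySem.Chars.endswith remainder ('_' :: det) then
      some (PySem.Chars.slice remainder none (some (-((det.length : Int) + 1))))
    else pvStripLoop remainder rest

def extract_dataset_py (run_id : String) : Option String :=
  let parts := PySem.Chars.splitOnMax run_id.toList ['_'] 2
  if parts.length < 3 then none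
  else
    (pvStripLoop (parts.getD 2 [])
      (PySem.List.sorted pvKnownDetectors (fun d => d.length) true)).map String.ofList

-- ===== PORT B =====
def pvDetectorSet : PySem.Set (List Char) := PySem.Set.ofList pvKnownDetectors

-- B's 'for j, ch in enumerate(remainder): if ch == "_" and remainder[j+1:] in detectors: return remainder[:j]'
def pvSuffixScan (remainder : List Char) : List (Int × Char) → Option (List Char)
  | [] => none
  | (j, ch) :: rest =>
    if ch == '_' && pvDetectorSet.contains (PySem.Chars.slice remainder (some (j + 1)) none) then
      some (PySem.Chars.slice remainder none (some j))
    else pvSuffixScan remainder rest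

def extract_dataset_py_alt (run_id : String) : Option String :=
  let parts := PySem.Chars.splitOnMax run_id.toList ['_'] 2
  if parts.length < 3 then none
  else
    let remainder := parts.getD 2 []
    (pvSuffixScan remainder (PySem.List.enumerate remainder 0)).map String.ofList

-- ===== PRECONDITION & SPEC =====
def Spec_extract_dataset_py (run_id : String) (out : Option String) : Prop := out = extract_dataset_py_alt run_id
instance (run_id : String) (out : Option String) : Decidable (Spec_extract_dataset_py run_id out) := by unfold Spec_extract_dataset_py; infer_instance

-- ===== CLAIM (what is proved, stated in full; the proofs are below) =====
def Claim_equal_extract_dataset_py : Prop := ∀ (run_id : String), Dom_extract_dataset_py run_id → Spec_extract_dataset_py run_id (extract_dataset_py run_id)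

-- ===== LEMMAS AND PROOFS =====

-- 'Position j of the remainder is an underscore and the suffix after it is a known detector.'
def pvHit (r : List Char) (j : Nat) : Bool :=
  r[j]? == some '_' && pvKnownDetectors.contains (r.drop (j + 1))

theorem pvScan_cond (r : List Char) (j : Nat) (hj : j < r.length) :
    (r[j] == '_' && pvDetectorSet.contains (PySem.Chars.slice r (some ((j : Int) + 1)) none)) = pvHit r j := by
  unfold pvHit
  rw [List.getElem?_eq_getElem hj]
  have h1 : ((j : Int) + 1) = ((j + 1 : Nat) : Int) := by push_cast; ring
  rw [PySem.Chars.slice_eq_listSlice, h1, PySem.List.slice_from_natCast]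
  rw [Bool.eq_iff_iff]
  simp [pvDetectorSet, PySem.Set.mem_ofList]

theorem pvHit_of_endswith (r d : List Char) (hd : d ∈ pvKnownDetectors)
    (h : PySem.Chars.endswith r ('_' :: d) = true) :
    d.length + 1 ≤ r.length ∧ pvHit r (r.length - d.length - 1) = true ∧
      r.drop (r.length - d.length) = d := by
  rw [PySem.Chars.endswith_iff] at h
  obtain ⟨t, ht⟩ := h
  have hlen : r.length = t.length + (d.length + 1) := by rw [← ht]; simp
  have hj : r.length - d.length - 1 = t.length := by omega
  have hdrop : r.drop (t.length + 1) = d := by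
    rw [← ht]
    simp [List.drop_length_add_append (l₁ := t) (l₂ := '_' :: d) (i := 1)]
  refine ⟨by omega, ?_, by rw [show r.length - d.length = t.length + 1 by omega]; exact hdrop⟩
  unfold pvHit
  rw [hj]
  have hget : r[t.length]? = some '_' := by
    rw [← ht, List.getElem?_append_right (le_refl t.length)]
    simp
  rw [hget, show t.length + 1 = t.length + 1 from rfl, hdrop]
  simp [hd]

theorem pvEndswith_of_hit (r : List Char) (j : Nat) (h : pvHit r j = true) :
    j < r.length ∧ r.drop (j + 1) ∈ pvKnownDetectors ∧
      PySem.Chars.endswith r ('_' :: r.drop (j + 1)) = true := by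
  unfold pvHit at h
  rw [Bool.and_eq_true, beq_iff_eq, List.contains_iff_mem] at h
  obtain ⟨hget, hmem⟩ := h
  have hj : j < r.length := by
    by_contra hc
    rw [List.getElem?_eq_none_iff.mpr (by omega)] at hget
    simp at hget
  refine ⟨hj, hmem, ?_⟩
  rw [PySem.Chars.endswith_iff]
  have : r.drop j = '_' :: r.drop (j + 1) := by
    rw [List.drop_eq_getElem_cons hj]
    rw [List.getElem?_eq_getElem hj] at hget
    simp at hget
    rw [hget]
  rw [← this]
  exact List.drop_suffix j r

theorem pvScan_none (r : List Char) (k : Nat)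
    (h : ∀ j, k ≤ j → pvHit r j = false) :
    pvSuffixScan r (PySem.List.enumerate (r.drop k) k) = none := by
  have H : ∀ n k, r.length - k = n → (∀ j, k ≤ j → pvHit r j = false) →
      pvSuffixScan r (PySem.List.enumerate (r.drop k) (k : Int)) = none := by
    intro n
    induction n with
    | zero =>
      intro k hn _
      rw [List.drop_eq_nil_of_le (by omega)]
      rfl
    | succ m ih =>
      intro k hn hall
      have hk : k < r.length := by omega
      rw [List.drop_eq_getElem_cons hk, PySem.List.enumerate_cons]
      show (if _ then _ else _) = _
      rw [pvScan_cond r k hk, hall k le_rfl]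
      simp only [if_neg Bool.false_ne_true]
      have : ((k : Int) + 1) = ((k + 1 : Nat) : Int) := by push_cast; ring
      rw [this]
      exact ih (k + 1) (by omega) (fun j hj => hall j (by omega))
  exact H (r.length - k) k rfl h

theorem pvScan_some (r : List Char) (j0 : Nat) (hj : pvHit r j0 = true) :
    ∀ k, k ≤ j0 → (∀ j, k ≤ j → j < j0 → pvHit r j = false) →
    pvSuffixScan r (PySem.List.enumerate (r.drop k) k) = some (r.take j0) := by
  have hj0 : j0 < r.length := by
    unfold pvHit at hj
    rw [Bool.and_eq_true, beq_iff_eq] at hj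
    by_contra hc
    rw [List.getElem?_eq_none_iff.mpr (by omega)] at hj
    simp at hj
  have H : ∀ n k, j0 - k = n → k ≤ j0 → (∀ j, k ≤ j → j < j0 → pvHit r j = false) →
      pvSuffixScan r (PySem.List.enumerate (r.drop k) (k : Int)) = some (r.take j0) := by
    intro n
    induction n with
    | zero =>
      intro k hn hk _
      have hkj : k = j0 := by omega
      subst hkj
      rw [List.drop_eq_getElem_cons hj0, PySem.List.enumerate_cons]
      show (if _ then _ else _) = _
      rw [pvScan_cond r k hj0, hj]
      rw [if_pos rfl, PySem.Chars.slice_eq_listSlice, PySem.List.slice_to_natCast]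
    | succ m ih =>
      intro k hn hk hall
      have hklt : k < j0 := by omega
      have hkr : k < r.length := by omega
      rw [List.drop_eq_getElem_cons hkr, PySem.List.enumerate_cons]
      show (if _ then _ else _) = _
      rw [pvScan_cond r k hkr, hall k le_rfl hklt]
      simp only [if_neg Bool.false_ne_true]
      have : ((k : Int) + 1) = ((k + 1 : Nat) : Int) := by push_cast; ring
      rw [this]
      exact ih (k + 1) (by omega) (by omega) (fun j hj1 hj2 => hall j (by omega) hj2)
  exact fun k hk hall => H (j0 - k) k rfl hk hall

theorem pvLoop_none (r : List Char) (ds : List (List Char))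
    (h : ∀ d ∈ ds, PySem.Chars.endswith r ('_' :: d) = false) :
    pvStripLoop r ds = none := by
  induction ds with
  | nil => rfl
  | cons d rest ih =>
    unfold pvStripLoop
    rw [h d List.mem_cons_self]
    simp only [if_neg Bool.false_ne_true]
    exact ih (fun d' hd' => h d' (List.mem_cons_of_mem d hd'))

theorem pvLoop_some (r det0 : List Char) (ds : List (List Char))
    (hsort : ds.Pairwise (fun a b => b.length ≤ a.length))
    (hmem : det0 ∈ ds)
    (hE : PySem.Chars.endswith r ('_' :: det0) = true)
    (hmax : ∀ d ∈ ds, PySem.Chars.endswith r ('_' :: d) = true → d.length ≤ det0.length) :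
    pvStripLoop r ds = some (r.take (r.length - det0.length - 1)) := by
  induction ds with
  | nil => simp at hmem
  | cons d rest ih =>
    rw [List.pairwise_cons] at hsort
    unfold pvStripLoop
    by_cases hEd : PySem.Chars.endswith r ('_' :: d) = true
    · rw [hEd, if_pos rfl]
      -- the matching head must be det0 itself
      have hdd : d = det0 := by
        rcases List.mem_cons.mp hmem with h0 | h0
        · exact h0.symm
        · have h1 : d.length ≤ det0.length := hmax d List.mem_cons_self hEd
          have h2 : det0.length ≤ d.length := hsort.1 det0 h0
          have hlen : ('_' :: d).length = ('_' :: det0).length := by simp; omega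
          rw [PySem.Chars.endswith_iff, List.suffix_iff_eq_drop] at hEd hE
          rw [hlen] at hEd
          have h3 := hEd.trans hE.symm
          exact (List.cons.injEq _ _ _ _ ▸ h3).2
      subst hdd
      have hpos : 0 < d.length + 1 := by omega
      have hcast : -((d.length : Int) + 1) = -(((d.length + 1 : Nat) : Int)) := by push_cast; ring
      rw [PySem.Chars.slice_eq_listSlice, hcast, PySem.List.slice_to_neg_natCast r _ hpos]
      rw [show r.length - (d.length + 1) = r.length - d.length - 1 by omega]
    · rw [Bool.not_eq_true] at hEd
      rw [hEd]
      simp only [if_neg Bool.false_ne_true]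
      have hmem' : det0 ∈ rest := by
        rcases List.mem_cons.mp hmem with h0 | h0
        · exact absurd (h0 ▸ hE) (by simp [hEd])
        · exact h0
      exact ih hsort.2 hmem' (fun d' hd' => hmax d' (List.mem_cons_of_mem d hd'))

theorem pvMain (r : List Char) :
    pvStripLoop r (PySem.List.sorted pvKnownDetectors (fun d => d.length) true) =
      pvSuffixScan r (PySem.List.enumerate r 0) := by
  have hL : PySem.List.sorted pvKnownDetectors (fun d => d.length) true =
      ["altfreezing".toList, "clip_dfdet".toList, "genconvit".toList, "cvit".toList,
       "clip".toList, "sbi".toList, "npr".toList] := by decide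
  have hsortL : (["altfreezing".toList, "clip_dfdet".toList, "genconvit".toList, "cvit".toList,
       "clip".toList, "sbi".toList, "npr".toList] : List (List Char)).Pairwise
       (fun a b => b.length ≤ a.length) := by decide
  have hmemL : ∀ x : List Char,
      x ∈ (["altfreezing".toList, "clip_dfdet".toList, "genconvit".toList, "cvit".toList,
       "clip".toList, "sbi".toList, "npr".toList] : List (List Char)) ↔ x ∈ pvKnownDetectors := by
    intro x; simp only [pvKnownDetectors, List.mem_cons, List.not_mem_nil]; tauto
  have henum : PySem.List.enumerate r (0 : Int) =
      PySem.List.enumerate (r.drop 0) (((0 : Nat) : Int)) := by simp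
  rw [hL, henum]
  by_cases hex : ∃ j, pvHit r j = true
  · have hhit := Nat.find_spec hex
    set j0 := Nat.find hex with hj0def
    obtain ⟨hj0len, hmem0, hE0⟩ := pvEndswith_of_hit r j0 hhit
    have hlen0 : (r.drop (j0 + 1)).length = r.length - (j0 + 1) := List.length_drop
    rw [pvScan_some r j0 hhit 0 (Nat.zero_le _)
      (fun j _ hj => eq_false_of_ne_true (Nat.find_min hex hj))]
    rw [pvLoop_some r (r.drop (j0 + 1)) _ hsortL ((hmemL _).mpr hmem0) hE0 ?_]
    · rw [hlen0, show r.length - (r.length - (j0 + 1)) - 1 = j0 by omega]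
    · intro d hd hEd
      obtain ⟨hb, hhitd, _⟩ := pvHit_of_endswith r d ((hmemL d).mp hd) hEd
      have hm := Nat.find_min' hex hhitd
      rw [hlen0]
      omega
  · push Not at hex
    rw [pvScan_none r 0 (fun j _ => eq_false_of_ne_true (hex j))]
    apply pvLoop_none
    intro d hd
    cases hcase : PySem.Chars.endswith r ('_' :: d) with
    | false => rfl
    | true =>
      obtain ⟨_, hhitd, _⟩ := pvHit_of_endswith r d ((hmemL d).mp hd) hcase
      exact absurd hhitd (hex _)

-- ===== VERDICT (by name: the statement is the Claim_ definition above) =====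
theorem extract_dataset_py_spec : Claim_equal_extract_dataset_py := by
  intro run_id _
  unfold Spec_extract_dataset_py extract_dataset_py extract_dataset_py_alt
  simp only
  split
  · rfl
  · rw [pvMain]
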